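-- pv_equiv track=rewrite | github.com/BarrettRed/sum24 | app.py | is_unique_subset
-- ===== SOURCE A (Python) =====
-- def is_unique_subset(entities, attributes):
--     """
--     Проверяет, уникален ли набор признаков для каждой сущности.
--
--     Аргументы:
--     entities -- список сущностей (словарей).
--     attributes -- список признаков (ключей), которые нужно проверить.
--
--     Возвращает:
--     True, если набор признаков уникален для каждой сущности, иначе False.
--     """
--     seen = set()
--     for entity in entities:
--         identifier = tuple(entity.get(attr, "") for attr in attributes)
--         if identifier in seen:
--             return False
--         seen.add(identifier)
--     return True
-- ===== SOURCE B (Python) =====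
-- def _all_distinct(ids):
--     if not ids:
--         return True
--     return ids[0] not in ids[1:] and _all_distinct(ids[1:])
--
--
-- def is_unique_subset(entities, attributes):
--     ids = [tuple(entity.get(attr, "") for attr in attributes) for entity in entities]
--     return _all_distinct(ids)
-- ===== Notes on version B (the rewrite author's own statement) =====
-- stated objective: alternative
-- what changed: Replaces A's single-pass hash-set membership loop by a set-free two-phase shape: first materialise all identifier tuples, then check pairwise distinctness by structural recursion (head not in tail), using only list membership and no set at all.
import Mathlib
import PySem

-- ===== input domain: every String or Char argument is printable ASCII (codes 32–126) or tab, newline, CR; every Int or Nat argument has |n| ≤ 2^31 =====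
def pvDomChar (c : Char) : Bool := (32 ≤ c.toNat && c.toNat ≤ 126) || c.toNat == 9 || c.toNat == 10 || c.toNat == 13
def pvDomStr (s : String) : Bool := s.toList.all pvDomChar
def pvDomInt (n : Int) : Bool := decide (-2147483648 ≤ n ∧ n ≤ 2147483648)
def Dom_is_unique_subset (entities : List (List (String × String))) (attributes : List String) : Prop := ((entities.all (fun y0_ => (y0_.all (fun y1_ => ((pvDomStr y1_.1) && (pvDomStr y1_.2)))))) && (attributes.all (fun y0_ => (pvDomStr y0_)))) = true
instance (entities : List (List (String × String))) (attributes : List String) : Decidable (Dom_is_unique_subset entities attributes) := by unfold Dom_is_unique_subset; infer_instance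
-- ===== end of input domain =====

-- B is an alternative decomposition: instead of A's one-pass seen-set loop with early exit,
-- B first materialises all identifier tuples and then checks distinctness by structural
-- recursion (head not in tail), with no set at all.

-- ===== PORT A =====
-- the for-loop over entities with the mutable 'seen' set and early 'return False'
def isUniqueLoop (attributes : List String) :
    List (List (String × String)) → PySem.Set (List String) → Bool
  | [], _ => true
  | entity :: rest, seen =>
    let identifier := attributes.map (fun attr => PySem.Dict.getD (PySem.Dict.mk entity) attr "")
    if identifier ∈ seen then false
    else isUniqueLoop attributes rest (PySem.Set.add seen identifier)

def is_unique_subset (entities : List (List (String × String))) (attributes : List String) : Bool :=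
  isUniqueLoop attributes entities PySem.Set.empty

-- ===== PORT B =====
-- _all_distinct(ids): empty → True; else ids[0] not in ids[1:] and _all_distinct(ids[1:])
def allDistinct : List (List String) → Bool
  | [] => true
  | x :: rest => !(rest.contains x) && allDistinct rest

def is_unique_subset_alt (entities : List (List (String × String))) (attributes : List String) : Bool :=
  let ids := entities.map (fun entity => attributes.map (fun attr => PySem.Dict.getD (PySem.Dict.mk entity) attr ""))
  allDistinct ids

-- ===== PRECONDITION & SPEC =====
def Spec_is_unique_subset (entities : List (List (String × String))) (attributes : List String) (out : Bool) : Prop := out = is_unique_subset_alt entities attributes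
instance (entities : List (List (String × String))) (attributes : List String) (out : Bool) : Decidable (Spec_is_unique_subset entities attributes out) := by unfold Spec_is_unique_subset; infer_instance

-- ===== CLAIM (what is proved, stated in full; the proofs are below) =====
def Claim_equal_is_unique_subset : Prop := ∀ (entities : List (List (String × String))) (attributes : List String), Dom_is_unique_subset entities attributes → Spec_is_unique_subset entities attributes (is_unique_subset entities attributes)

-- ===== LEMMAS AND PROOFS =====

theorem allDistinct_iff_nodup (l : List (List String)) :
    allDistinct l = true ↔ l.Nodup := by
  induction l with
  | nil => simp [allDistinct]
  | cons x rest ih =>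
    simp [allDistinct, List.nodup_cons, ih, and_comm]

theorem loop_true_iff (attributes : List String) (es : List (List (String × String)))
    (seen : PySem.Set (List String)) :
    isUniqueLoop attributes es seen = true ↔
      ((es.map (fun e => attributes.map (fun attr => PySem.Dict.getD (PySem.Dict.mk e) attr ""))).Nodup ∧
        ∀ x ∈ es.map (fun e => attributes.map (fun attr => PySem.Dict.getD (PySem.Dict.mk e) attr "")), x ∉ seen) := by
  induction es generalizing seen with
  | nil => simp [isUniqueLoop]
  | cons e rest ih =>
    simp only [isUniqueLoop, List.map_cons, List.nodup_cons, List.mem_cons]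
    set id0 := attributes.map (fun attr => PySem.Dict.getD (PySem.Dict.mk e) attr "") with hid0
    by_cases hmem : id0 ∈ seen
    · simp [hmem]
    · simp only [hmem, ite_false]
      rw [ih]
      constructor
      · rintro ⟨hnd, hall⟩
        have hid0notin : id0 ∉ rest.map (fun e => attributes.map (fun attr => PySem.Dict.getD (PySem.Dict.mk e) attr "")) := by
          intro h
          exact (hall id0 h) ((PySem.Set.mem_add _ _ _).mpr (Or.inr rfl))
        refine ⟨⟨hid0notin, hnd⟩, ?_⟩
        intro y hy
        rcases hy with hy0 | hyr
        · exact hy0 ▸ hmem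
        · intro hys
          exact (hall y hyr) ((PySem.Set.mem_add _ _ _).mpr (Or.inl hys))
      · rintro ⟨⟨hid0notin, hnd⟩, hall⟩
        refine ⟨hnd, ?_⟩
        intro y hyr hy
        rcases (PySem.Set.mem_add _ _ _).mp hy with hys | hyid
        · exact (hall y (Or.inr hyr)) hys
        · exact hid0notin (hyid ▸ hyr)

-- ===== VERDICT (by name: the statement is the Claim_ definition above) =====
theorem is_unique_subset_spec : Claim_equal_is_unique_subset := by
  intro entities attributes _
  unfold Spec_is_unique_subset is_unique_subset is_unique_subset_alt
  have hA := loop_true_iff attributes entities PySem.Set.empty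
  have hB := allDistinct_iff_nodup (entities.map (fun e => attributes.map (fun attr => PySem.Dict.getD (PySem.Dict.mk e) attr "")))
  rw [Bool.eq_iff_iff, hA, hB]
  simp [PySem.Set.empty]
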